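-- pv_equiv track=rewrite | github.com/pypi-data/pypi-mirror-401 | packages/eopf-geozarr/eopf_geozarr-0.7.0.tar.gz/eopf_geozarr-0.7.0/src/eopf_geozarr/conversion/fs_utils.py | normalize_s3_path
-- ===== SOURCE A (Python) =====
-- def normalize_s3_path(s3_path: str) -> str:
--     """
--     Normalize an S3 path by removing double slashes and ensuring proper format.
--
--     This is important for OVH S3 which is sensitive to double slashes.
--
--     Parameters
--     ----------
--     s3_path : str
--         S3 path to normalize
--
--     Returns
--     -------
--     str
--         Normalized S3 path
--     """
--     if not s3_path.startswith("s3://"):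
--         return s3_path
--
--     # Split into scheme and path parts
--     scheme = "s3://"
--     path_part = s3_path[5:]  # Remove "s3://"
--
--     # Remove double slashes from the path part
--     # But preserve the bucket/key structure
--     parts = path_part.split("/")
--     # Filter out empty parts (which come from double slashes)
--     normalized_parts = [part for part in parts if part]
--
--     # Reconstruct the path
--     return scheme + "/".join(normalized_parts) if normalized_parts else scheme
-- ===== SOURCE B (Python) =====
-- def normalize_s3_path(s3_path: str) -> str:
--     """Single-pass character scanner: collapse slash runs in the path part and
--     drop leading/trailing slashes, without split/filter/join."""
--     if not s3_path.startswith("s3://"):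
--         return s3_path
--     out = []
--     boundary = True  # we are at a segment boundary (start or just after '/')
--     for ch in s3_path[5:]:
--         if ch == "/":
--             boundary = True
--         else:
--             if boundary and out:
--                 out.append("/")
--             out.append(ch)
--             boundary = False
--     return "s3://" + "".join(out)
-- ===== Notes on version B (the rewrite author's own statement) =====
-- stated objective: alternative
-- what changed: Replaces split + filter-empty + join with a single-pass character scanner that emits a separating slash only between nonempty segments.
import Mathlib
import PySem

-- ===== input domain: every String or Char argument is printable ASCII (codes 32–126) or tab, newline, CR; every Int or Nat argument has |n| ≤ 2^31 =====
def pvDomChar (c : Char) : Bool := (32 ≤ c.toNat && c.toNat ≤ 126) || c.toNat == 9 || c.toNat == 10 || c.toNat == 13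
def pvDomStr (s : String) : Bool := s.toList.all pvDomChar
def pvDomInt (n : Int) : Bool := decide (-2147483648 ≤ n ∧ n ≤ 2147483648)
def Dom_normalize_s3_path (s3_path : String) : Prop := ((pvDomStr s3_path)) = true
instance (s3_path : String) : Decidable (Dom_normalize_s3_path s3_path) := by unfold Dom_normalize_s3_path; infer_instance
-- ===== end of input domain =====

-- B replaces A's split-filter-join pipeline with a single-pass character scanner
-- (alternative decomposition, same asymptotic cost).

-- ===== PORT A =====
def normalize_s3_path (s3_path : String) : String :=
  if !(PySem.Str.startswith s3_path "s3://") then s3_path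
  else
    let scheme := "s3://"
    let path_part := PySem.Str.slice s3_path (some 5) none       -- s3_path[5:]
    let parts := PySem.Chars.splitOn path_part.toList ['/']      -- path_part.split("/")
    let normalized_parts := parts.filter (fun part => part ≠ []) -- [part for part in parts if part]
    if normalized_parts ≠ [] then scheme ++ String.ofList (PySem.Chars.join ['/'] normalized_parts)
    else scheme

-- ===== PORT B =====
def normalize_s3_path_alt (s3_path : String) : String :=
  if !(PySem.Str.startswith s3_path "s3://") then s3_path
  else
    let step := fun (st : List Char × Bool) (ch : Char) =>
      if ch = '/' then (st.1, true)
      else ((if st.2 && !(st.1.isEmpty) then st.1 ++ ['/'] else st.1) ++ [ch], false)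
    let r := (PySem.Str.slice s3_path (some 5) none).toList.foldl step ([], true)
    "s3://" ++ String.ofList r.1

-- ===== PRECONDITION & SPEC =====
def Spec_normalize_s3_path (s3_path : String) (out : String) : Prop := out = normalize_s3_path_alt s3_path
instance (s3_path : String) (out : String) : Decidable (Spec_normalize_s3_path s3_path out) := by unfold Spec_normalize_s3_path; infer_instance

-- ===== CLAIM (what is proved, stated in full; the proofs are below) =====
def Claim_equal_normalize_s3_path : Prop := ∀ (s3_path : String), Dom_normalize_s3_path s3_path → Spec_normalize_s3_path s3_path (normalize_s3_path s3_path)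

-- ===== LEMMAS AND PROOFS =====

-- canonical normalized body: started = output already nonempty, mid = inside a segment
def pvSeg (started mid : Bool) : List Char → List Char
  | [] => []
  | c :: r =>
      if c = '/' then pvSeg started false r
      else if mid then c :: pvSeg true true r
      else (if started then ['/', c] else [c]) ++ pvSeg true true r

def pvSplit (cur : List Char) : List Char → List (List Char)
  | [] => [cur]
  | c :: r => if c = '/' then cur :: pvSplit [] r else pvSplit (cur ++ [c]) r

def pvFjoin : List (List Char) → List Char
  | [] => []
  | a :: r => a ++ r.flatMap (fun s => '/' :: s)

lemma foldl_step_eq_pvSeg (cs : List Char) : ∀ (out : List Char) (flag : Bool),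
    (cs.foldl (fun (st : List Char × Bool) (ch : Char) =>
        if ch = '/' then (st.1, true)
        else ((if st.2 && !(st.1.isEmpty) then st.1 ++ ['/'] else st.1) ++ [ch], false))
      (out, flag)).1 = out ++ pvSeg (!out.isEmpty) (!flag) cs := by
  induction cs with
  | nil => intro out flag; simp [pvSeg]
  | cons c r ih =>
      intro out flag
      simp only [List.foldl_cons]
      by_cases hslash : c = '/'
      · subst hslash
        rw [if_pos rfl, ih out true]
        simp [pvSeg]
      · rw [if_neg hslash]
        cases flag with
        | false =>
            simp only [Bool.false_and, Bool.false_eq_true, if_false]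
            rw [ih (out ++ [c]) false]
            cases out <;> simp [pvSeg, hslash]
        | true =>
            cases hout : out.isEmpty with
            | true =>
                have : out = [] := by simpa using hout
                subst this
                simp only [Bool.not_true, Bool.and_false, Bool.false_eq_true,
                  if_false, List.nil_append]
                rw [ih [c] false]
                simp [pvSeg, hslash]
            | false =>
                simp only [Bool.not_false, Bool.and_true, if_true]
                rw [List.append_assoc out ['/'] [c], ih (out ++ (['/'] ++ [c])) false]
                have hne : (out ++ ['/', c]).isEmpty = false := by
                  cases out <;> simp
                simp [pvSeg, hslash, hne]
lemma go_eq_pvSplit (l : List Char) : ∀ (fuel : Nat) (cur : List Char) (acc : List (List Char)),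
    l.length < fuel →
    PySem.Chars.splitOn.go ['/'] fuel l cur acc = acc.reverse ++ pvSplit cur.reverse l := by
  induction l with
  | nil =>
      intro fuel cur acc h
      match fuel, h with
      | fuel + 1, _ =>
        rw [PySem.Chars.splitOn.go]
        · simp [pvSplit]
        · omega
  | cons c r ih =>
      intro fuel cur acc h
      match fuel, h with
      | fuel + 1, h =>
        rw [PySem.Chars.splitOn.go]
        by_cases hc : c = '/'
        · subst hc
          rw [if_pos (by simp [List.isPrefixOf])]
          show PySem.Chars.splitOn.go ['/'] fuel (List.drop ['/'].length ('/' :: r)) [] (cur.reverse :: acc) = _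
          simp only [List.length_singleton, List.drop_succ_cons, List.drop_zero]
          rw [ih fuel [] (cur.reverse :: acc) (by simpa using h)]
          simp [pvSplit]
        · rw [if_neg (by simp [List.isPrefixOf]; exact fun hcc => absurd hcc.symm hc)]
          rw [ih fuel (c :: cur) acc (by simpa using Nat.lt_of_succ_lt_succ h)]
          simp [pvSplit, hc]

lemma splitOn_eq_pvSplit (cs : List Char) :
    PySem.Chars.splitOn cs ['/'] = pvSplit [] cs := by
  unfold PySem.Chars.splitOn
  rw [go_eq_pvSplit cs (cs.length + 1) [] [] (Nat.lt_succ_self _)]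
  simp
lemma join_eq_pvFjoin (L : List (List Char)) :
    PySem.Chars.join ['/'] L = pvFjoin L := by
  induction L with
  | nil => simp [PySem.Chars.join, List.intercalate, pvFjoin]
  | cons a r ih =>
      cases r with
      | nil => simp [PySem.Chars.join, pvFjoin, List.intercalate]
      | cons b t =>
          simp only [pvFjoin, List.flatMap_cons] at ih ⊢
          rw [PySem.Chars.join_cons_cons, ih]
          simp

lemma pvSplit_spec (cs : List Char) : ∀ (cur : List Char),
    (pvFjoin ((pvSplit cur cs).filter (fun p => p ≠ [])) =
      if cur = [] then pvSeg false false cs else cur ++ pvSeg true true cs)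
    ∧ (((pvSplit cur cs).filter (fun p => p ≠ [])).flatMap (fun s => '/' :: s) =
      if cur = [] then pvSeg true false cs else '/' :: (cur ++ pvSeg true true cs)) := by
  induction cs with
  | nil =>
      intro cur
      by_cases hc : cur = [] <;> simp [pvSplit, pvSeg, pvFjoin, hc]
  | cons c r ih =>
      intro cur
      by_cases hslash : c = '/'
      · subst hslash
        have h2 := ih []
        simp only [] at h2
        by_cases hc : cur = []
        · subst hc
          simpa [pvSplit, pvSeg] using ih []
        · have hfc : List.filter (fun p => decide (p ≠ [])) (cur :: pvSplit [] r) =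
              cur :: List.filter (fun p => decide (p ≠ [])) (pvSplit [] r) :=
            List.filter_cons_of_pos (by simpa using hc)
          refine ⟨?_, ?_⟩ <;>
            · simp [pvSplit, pvSeg, pvFjoin, hc]
              simpa using h2.2
      · have h2 := ih (cur ++ [c])
        have hne : cur ++ [c] ≠ [] := by simp
        simp only [if_neg hne] at h2
        constructor
        · simp only [pvSplit, pvSeg, if_neg hslash]
          rw [h2.1]
          by_cases hc : cur = [] <;> simp [hc]
        · simp only [pvSplit, pvSeg, if_neg hslash]
          rw [h2.2]
          by_cases hc : cur = [] <;> simp [hc]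

lemma body_eq (cs : List Char) :
    (if ((pvSplit [] cs).filter (fun p => p ≠ [])) ≠ [] then
        "s3://" ++ String.ofList (PySem.Chars.join ['/'] ((pvSplit [] cs).filter (fun p => p ≠ [])))
      else "s3://")
    = "s3://" ++ String.ofList (pvSeg false false cs) := by
  have h := (pvSplit_spec cs []).1
  rw [if_pos rfl] at h
  by_cases hF : ((pvSplit [] cs).filter (fun p => p ≠ [])) = []
  · rw [if_neg (by simpa using hF)]
    rw [hF] at h
    simp only [pvFjoin] at h
    apply String.toList_inj.mp
    simp [← h]
  · rw [if_pos hF, join_eq_pvFjoin, h]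

-- ===== VERDICT (by name: the statement is the Claim_ definition above) =====
theorem normalize_s3_path_spec : Claim_equal_normalize_s3_path := by
  intro s3_path _
  unfold Spec_normalize_s3_path normalize_s3_path normalize_s3_path_alt
  cases hs : PySem.Str.startswith s3_path "s3://" with
  | false => simp only [Bool.not_false, if_true]
  | true =>
      simp only [Bool.not_true, Bool.false_eq_true, if_false]
      rw [foldl_step_eq_pvSeg _ [] true, splitOn_eq_pvSplit]
      simpa using body_eq (PySem.Str.slice s3_path (some 5) none).toList
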